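-- pv_equiv track=rewrite | github.com/kk7ds/chirp | chirp/drivers/kenwood_live.py | degsub
-- ===== SOURCE A (Python) =====
-- def degsub(minuend, subtrahend):
--     m = list(minuend)
--     s = list(subtrahend)
--     res = [None] * 3
--     for i in (2, 1):
--         res[i] = m[i] - s[i]
--         if res[i] < 0:
--             res[i] += 60
--             m[i-1] -= 1
--     res[0] = m[0] - s[0]
--     return tuple(res)
-- ===== SOURCE B (Python) =====
-- def degsub(minuend, subtrahend):
--     # Recursive right-to-left ripple subtraction over the zipped digit list:
--     # each level recurses on the tail, then normalizes the tail's head digit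
--     # (adding 60 when negative) and charges the borrow to its own digit.
--     # The most significant digit is simply the last subtraction, unnormalized.
--     def go(pairs):
--         (m0, s0), *rest = pairs
--         if not rest:
--             return (m0 - s0,)
--         tail = go(rest)
--         if tail[0] < 0:
--             return (m0 - s0 - 1, tail[0] + 60) + tail[1:]
--         return (m0 - s0,) + tail
--     return go(list(zip(minuend, subtrahend)))
-- ===== Notes on version B (the rewrite author's own statement) =====
-- stated objective: alternative
-- what changed: Replaced A's index loop that mutates a result list and the minuend list in place with a pure structural recursion over the zipped digit list: each level recurses on the tail, normalizes the tail's head digit (+60 when negative) and charges the borrow to its own digit by subtraction; no mutation, no indices, no flags.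
import Mathlib
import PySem

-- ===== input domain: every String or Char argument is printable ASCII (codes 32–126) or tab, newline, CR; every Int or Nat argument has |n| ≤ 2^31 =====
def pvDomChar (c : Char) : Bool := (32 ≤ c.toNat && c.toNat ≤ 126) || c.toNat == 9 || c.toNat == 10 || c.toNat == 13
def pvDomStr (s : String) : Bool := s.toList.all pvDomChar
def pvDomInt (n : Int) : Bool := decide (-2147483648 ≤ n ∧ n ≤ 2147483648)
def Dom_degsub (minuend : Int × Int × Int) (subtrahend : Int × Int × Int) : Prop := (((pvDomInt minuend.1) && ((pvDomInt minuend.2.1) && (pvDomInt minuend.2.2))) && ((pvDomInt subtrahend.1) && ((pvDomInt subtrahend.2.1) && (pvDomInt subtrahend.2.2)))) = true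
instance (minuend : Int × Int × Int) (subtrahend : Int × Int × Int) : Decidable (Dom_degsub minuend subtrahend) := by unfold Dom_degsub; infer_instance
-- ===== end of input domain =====

-- B replaces A's mutating index loop with a pure structural recursion over the zipped digit list (objective: alternative decomposition).

-- ===== PORT A =====
def degsub (minuend : Int × Int × Int) (subtrahend : Int × Int × Int) : Int × Int × Int :=
  let m0 := minuend.1; let m1 := minuend.2.1; let m2 := minuend.2.2
  let s0 := subtrahend.1; let s1 := subtrahend.2.1; let s2 := subtrahend.2.2
  -- loop `for i in (2, 1)` unrolled; the mutated cells res[i] and m[i-1] are threaded as rebindings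
  -- iteration i = 2
  let r2 := m2 - s2
  let m1 := if r2 < 0 then m1 - 1 else m1
  let r2 := if r2 < 0 then r2 + 60 else r2
  -- iteration i = 1
  let r1 := m1 - s1
  let m0 := if r1 < 0 then m0 - 1 else m0
  let r1 := if r1 < 0 then r1 + 60 else r1
  (m0 - s0, r1, r2)

-- ===== PORT B =====
-- B's recursive helper `go` over the zipped digit list (most significant first)
def degsubGo : List (Int × Int) → List Int
  | [] => []            -- unreachable: `go` is only applied to nonempty lists
  | (m0, s0) :: rest =>
    if rest.isEmpty then [m0 - s0]
    else
      match degsubGo rest with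
      | [] => [m0 - s0]  -- unreachable
      | t :: ts => if t < 0 then (m0 - s0 - 1) :: (t + 60) :: ts else (m0 - s0) :: t :: ts

def degsub_alt (minuend : Int × Int × Int) (subtrahend : Int × Int × Int) : Int × Int × Int :=
  match degsubGo [(minuend.1, subtrahend.1), (minuend.2.1, subtrahend.2.1), (minuend.2.2, subtrahend.2.2)] with
  | [a, b, c] => (a, b, c)
  | _ => (0, 0, 0)      -- unreachable: the list has length 3

-- ===== PRECONDITION & SPEC =====
def Spec_degsub (minuend : Int × Int × Int) (subtrahend : Int × Int × Int) (out : Int × Int × Int) : Prop := out = degsub_alt minuend subtrahend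
instance (minuend : Int × Int × Int) (subtrahend : Int × Int × Int) (out : Int × Int × Int) : Decidable (Spec_degsub minuend subtrahend out) := by unfold Spec_degsub; infer_instance

-- ===== CLAIM (what is proved, stated in full; the proofs are below) =====
def Claim_equal_degsub : Prop := ∀ (minuend : Int × Int × Int) (subtrahend : Int × Int × Int), Dom_degsub minuend subtrahend → Spec_degsub minuend subtrahend (degsub minuend subtrahend)

-- ===== LEMMAS AND PROOFS =====

-- ===== VERDICT (by name: the statement is the Claim_ definition above) =====
theorem degsub_spec : Claim_equal_degsub := by
  intro ⟨m0, m1, m2⟩ ⟨s0, s1, s2⟩ _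
  unfold Spec_degsub degsub degsub_alt
  simp only [degsubGo, List.isEmpty]
  split_ifs <;> (try (exfalso; omega)) <;> simp <;> split_ifs <;> simp_all <;>
    first
      | omega
      | (rw [if_pos (show m1 - s1 < 1 by omega)] <;>
         simp only [Prod.mk.injEq, and_true, true_and] <;> omega)
      | (rw [if_neg (show ¬ m1 - s1 < 1 by omega)] <;>
         simp only [Prod.mk.injEq, and_true, true_and] <;> omega)
      | (rw [if_pos (show m1 < s1 by omega)] <;>
         simp only [Prod.mk.injEq, and_true, true_and] <;> omega)
      | (rw [if_neg (show ¬ m1 < s1 by omega)] <;>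
         simp only [Prod.mk.injEq, and_true, true_and] <;> omega)
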